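-- pv_equiv track=rewrite | github.com/VShah2312/Python_Portfolio | Leetcode/6. Linked List/test.py | solution
-- ===== SOURCE A (Python) =====
-- def solution(A):
--     zerocount= 0
--     result =0
--     for i in A:
--         if i ==0:
--             zerocount +=1
--         else:
--             result+= zerocount
--     return result
-- ===== SOURCE B (Python) =====
-- def solution(A):
--     remaining = sum(1 for x in A if x != 0)
--     result = 0
--     for x in A:
--         if x == 0:
--             result += remaining
--         else:
--             remaining -= 1
--     return result
-- ===== Notes on version B (the rewrite author's own statement) =====
-- stated objective: alternative
-- what changed: B precomputes the total number of nonzero elements and counts nonzeros-after each zero, instead of A's running zeros-before counter added at each nonzero.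
import Mathlib
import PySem

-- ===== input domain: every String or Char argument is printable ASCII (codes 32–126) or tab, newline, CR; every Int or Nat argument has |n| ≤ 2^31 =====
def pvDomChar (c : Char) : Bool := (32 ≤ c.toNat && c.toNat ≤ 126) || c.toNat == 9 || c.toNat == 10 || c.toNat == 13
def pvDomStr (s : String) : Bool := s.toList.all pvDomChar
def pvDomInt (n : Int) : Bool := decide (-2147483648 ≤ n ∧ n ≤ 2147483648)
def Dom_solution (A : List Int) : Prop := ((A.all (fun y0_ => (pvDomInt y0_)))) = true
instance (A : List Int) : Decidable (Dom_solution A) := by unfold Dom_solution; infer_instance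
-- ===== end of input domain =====

-- B replaces A's running zeros-before counter by a precomputed count of nonzeros remaining: alternative decomposition, same cost.

-- ===== PORT A =====
def solution (A : List Int) : Int :=
  (A.foldl (fun (s : Int × Int) i => if i == 0 then (s.1 + 1, s.2) else (s.1, s.2 + s.1)) (0, 0)).2

-- ===== PORT B =====
def solution_alt (A : List Int) : Int :=
  let remaining : Int := A.foldl (fun n x => if x ≠ 0 then n + 1 else n) 0
  (A.foldl (fun (s : Int × Int) x => if x == 0 then (s.1, s.2 + s.1) else (s.1 - 1, s.2)) (remaining, 0)).2

-- ===== PRECONDITION & SPEC =====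
def Spec_solution (A : List Int) (out : Int) : Prop := out = solution_alt A
instance (A : List Int) (out : Int) : Decidable (Spec_solution A out) := by unfold Spec_solution; infer_instance

-- ===== CLAIM (what is proved, stated in full; the proofs are below) =====
def Claim_equal_solution : Prop := ∀ (A : List Int), Dom_solution A → Spec_solution A (solution A)

-- ===== LEMMAS AND PROOFS =====

-- structural count of nonzeros
def pvNzc : List Int → Int
  | [] => 0
  | x :: t => (if x = 0 then 0 else 1) + pvNzc t

lemma pv_nz_fold (A : List Int) : ∀ n : Int,
    A.foldl (fun n x => if x ≠ 0 then n + 1 else n) n = n + pvNzc A := by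
  induction A with
  | nil => intro n; simp [pvNzc]
  | cons x t ih =>
    intro n
    by_cases h : x = 0
    · simp only [List.foldl, if_neg (not_not_intro h)]
      rw [ih n]; simp [pvNzc, h]
    · simp only [List.foldl, if_pos h]
      rw [ih (n + 1)]; simp [pvNzc, h]; ring

lemma pv_addB (A : List Int) : ∀ r s : Int,
    (A.foldl (fun (s : Int × Int) x => if x == 0 then (s.1, s.2 + s.1) else (s.1 - 1, s.2)) (r, s)).2
      = s + (A.foldl (fun (s : Int × Int) x => if x == 0 then (s.1, s.2 + s.1) else (s.1 - 1, s.2)) (r, 0)).2 := by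
  induction A with
  | nil => intro r s; simp
  | cons x t ih =>
    intro r s
    by_cases h : x = 0
    · simp only [List.foldl, h, beq_self_eq_true, if_true]
      rw [ih r (s + r), ih r (0 + r)]
      ring
    · have hb : (x == 0) = false := by simp [h]
      simp only [List.foldl, hb, Bool.false_eq_true, if_false]
      rw [ih (r - 1) s]

lemma pv_main (A : List Int) : ∀ zc res : Int,
    (A.foldl (fun (s : Int × Int) i => if i == 0 then (s.1 + 1, s.2) else (s.1, s.2 + s.1)) (zc, res)).2
      = res + zc * pvNzc A
        + (A.foldl (fun (s : Int × Int) x => if x == 0 then (s.1, s.2 + s.1) else (s.1 - 1, s.2)) (pvNzc A, 0)).2 := by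
  induction A with
  | nil => intro zc res; simp [pvNzc]
  | cons x t ih =>
    intro zc res
    by_cases h : x = 0
    · simp only [List.foldl, h, beq_self_eq_true, if_true, pvNzc, if_pos rfl, zero_add]
      rw [ih (zc + 1) res, pv_addB t (pvNzc t) (pvNzc t)]
      ring
    · have hb : (x == 0) = false := by simp [h]
      simp only [List.foldl, hb, Bool.false_eq_true, if_false, pvNzc, if_neg h]
      rw [ih zc (res + zc)]
      have e : (1 : Int) + pvNzc t - 1 = pvNzc t := by ring
      rw [e]
      ring

-- ===== VERDICT (by name: the statement is the Claim_ definition above) =====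
theorem solution_spec : Claim_equal_solution := by
  intro A _
  unfold Spec_solution solution solution_alt
  rw [pv_nz_fold A 0, pv_main A 0 0]
  ring
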